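-- pv_equiv track=rewrite | github.com/wq-will/SimpleTES | datasets/hadamard_maximal_det/hadamard_maximal_det_29/evaluator.py | det_bareiss
-- ===== SOURCE A (Python) =====
-- def det_bareiss(A):
--     """
--     Bareiss algorithm for exact integer determinant calculation.
--
--     Args:
--         A: List of lists representing an integer matrix
--
--     Returns:
--         int: The determinant
--     """
--     n = len(A)
--     if n == 0:
--         return 1
--     M = [row.copy() for row in A]
--     for k in range(n - 1):
--         if M[k][k] == 0:
--             for i in range(k + 1, n):
--                 if M[i][k] != 0:
--                     M[k], M[i] = M[i], M[k]
--                     break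
--             else:
--                 return 0
--         for i in range(k + 1, n):
--             for j in range(k + 1, n):
--                 num = M[i][j] * M[k][k] - M[i][k] * M[k][j]
--                 den = M[k - 1][k - 1] if k > 0 else 1
--                 M[i][j] = num // den
--     return M[-1][-1]
-- ===== SOURCE B (Python) =====
-- def det_bareiss(A):
--     """Exact integer determinant, computed by recursive fraction-free
--     condensation on shrinking fresh matrices (same division-free values as
--     Bareiss, but as recursion on submatrices instead of an in-place loop)."""
--     if not A:
--         return 1
--
--     def go(M, p):
--         if len(M) == 1:
--             return M[0][0]
--         if M[0][0] == 0:
--             r = next((i for i in range(1, len(M)) if M[i][0] != 0), None)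
--             if r is None:
--                 return 0
--             M = list(M)
--             M[0], M[r] = M[r], M[0]
--         piv = M[0][0]
--         top = M[0]
--         n = len(M)
--         N = [[(row[j] * piv - row[0] * top[j]) // p for j in range(1, n)]
--              for row in M[1:]]
--         return go(N, piv)
--
--     return go([list(row) for row in A], 1)
-- ===== Notes on version B (the rewrite author's own statement) =====
-- stated objective: alternative
-- what changed: A's in-place triple-nested Bareiss loop over one n x n matrix is replaced by recursive fraction-free condensation: each step builds a fresh (n-1) x (n-1) matrix from the pivot row/column and recurses, carrying the previous pivot as a parameter.
-- outside the precondition, e.g. on det_bareiss([[1, 2]]): A returns 2, B returns 1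
import Mathlib
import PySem

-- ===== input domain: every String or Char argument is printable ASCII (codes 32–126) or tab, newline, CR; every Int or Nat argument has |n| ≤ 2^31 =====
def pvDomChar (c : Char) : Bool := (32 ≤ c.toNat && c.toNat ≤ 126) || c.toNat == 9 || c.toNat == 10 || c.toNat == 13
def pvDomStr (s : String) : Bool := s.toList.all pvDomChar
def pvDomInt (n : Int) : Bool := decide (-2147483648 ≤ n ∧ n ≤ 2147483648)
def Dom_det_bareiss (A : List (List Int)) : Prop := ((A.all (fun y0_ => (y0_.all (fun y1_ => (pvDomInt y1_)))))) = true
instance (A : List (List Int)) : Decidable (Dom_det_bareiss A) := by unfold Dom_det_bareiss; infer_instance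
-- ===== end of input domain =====

-- B re-implements the same exact-integer elimination as recursive fraction-free
-- condensation on shrinking fresh matrices (alternative decomposition, same cost);
-- the equivalence below is about the return value on square matrices (Pre_).

-- ===== PORT A =====
-- shared tiny indexing helper: M[i][j] (total form; Pre_ keeps all indices in range)
def pvGetM (M : List (List Int)) (i j : Int) : Int :=
  PySem.List.pyGetD (PySem.List.pyGetD M i []) j 0

-- M with M[i][j] = v (indices are provably ≥ 0 where used)
def pvSetM (M : List (List Int)) (i j : Int) (v : Int) : List (List Int) :=
  PySem.List.pySetD M i (PySem.List.pySetD (PySem.List.pyGetD M i []) j v)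

def det_bareiss (A : List (List Int)) : Int :=
  let n : Int := (A.length : Int)
  if n = 0 then 1
  else
    let M0 := A.map (fun row => row)        -- [row.copy() for row in A]
    -- the outer for-k loop; the state is none once 'return 0' has fired
    let res : Option (List (List Int)) :=
      (PySem.List.pyRange 0 (n - 1) 1).foldl (fun st k =>
        match st with
        | none => none
        | some M =>
          -- pivot handling: for-else search and simultaneous swap M[k], M[i] = M[i], M[k]
          let fixed : Option (List (List Int)) :=
            if pvGetM M k k = 0 then
              match (PySem.List.pyRange (k + 1) n 1).find?
                      (fun i => pvGetM M i k != 0) with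
              | some i =>
                  some (PySem.List.pySetD
                          (PySem.List.pySetD M k (PySem.List.pyGetD M i []))
                          i (PySem.List.pyGetD M k []))
              | none => none
            else some M
          match fixed with
          | none => none
          | some M =>
            some ((PySem.List.pyRange (k + 1) n 1).foldl (fun M i =>
              (PySem.List.pyRange (k + 1) n 1).foldl (fun M j =>
                let num := pvGetM M i j * pvGetM M k k - pvGetM M i k * pvGetM M k j
                let den := if k > 0 then pvGetM M (k - 1) (k - 1) else 1
                pvSetM M i j (PySem.Int.floordiv num den)) M) M)) (some M0)
    match res with
    | none => 0
    | some M => PySem.List.pyGetD (PySem.List.pyGetD M (-1) []) (-1) 0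

-- ===== PORT B =====
-- M = list(M); M[0], M[r] = M[r], M[0]
def pvSwap0 (M : List (List Int)) (r : Int) : List (List Int) :=
  PySem.List.pySetD (PySem.List.pySetD M 0 (PySem.List.pyGetD M r []))
    r (PySem.List.pyGetD M 0 [])

-- N = [[(row[j]*piv - row[0]*top[j]) // p for j in range(1, n)] for row in M[1:]]
def pvCondense (M : List (List Int)) (p : Int) : List (List Int) :=
  (PySem.List.slice M (some 1) none).map (fun row =>
    (PySem.List.pyRange 1 ((M.length : Int)) 1).map (fun j =>
      PySem.Int.floordiv
        (PySem.List.pyGetD row j 0 * pvGetM M 0 0 -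
          PySem.List.pyGetD row 0 0 * PySem.List.pyGetD (PySem.List.pyGetD M 0 []) j 0)
        p))

theorem pvSwap0_length (M : List (List Int)) (r : Int) :
    (pvSwap0 M r).length = M.length := by
  simp [pvSwap0, PySem.List.length_pySetD]

theorem pvCondense_length (M : List (List Int)) (p : Int) :
    (pvCondense M p).length = M.length - 1 := by
  simp [pvCondense, PySem.List.slice_from_one]

-- go(M, p): recursion on a strictly shrinking fresh matrix
def pvGoB (M : List (List Int)) (p : Int) : Int :=
  match M with
  | [] => 0                                  -- unreachable: go is never called on []
  | [row] => PySem.List.pyGetD row 0 0       -- len(M) == 1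
  | a :: b :: rest =>
    let M0 := a :: b :: rest
    if pvGetM M0 0 0 = 0 then
      match (PySem.List.pyRange 1 (M0.length : Int) 1).find?
              (fun i => pvGetM M0 i 0 != 0) with
      | none => 0                            -- r is None
      | some r => pvGoB (pvCondense (pvSwap0 M0 r) p) (pvGetM (pvSwap0 M0 r) 0 0)
    else pvGoB (pvCondense M0 p) (pvGetM M0 0 0)
termination_by M.length
decreasing_by
  · simp [pvCondense_length, pvSwap0_length]
  · simp [pvCondense_length]

def det_bareiss_alt (A : List (List Int)) : Int :=
  if A = [] then 1
  else pvGoB (A.map (fun row => row)) 1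

-- ===== PRECONDITION & SPEC =====
-- Pre_ restricts to SQUARE matrices, the only inputs with a determinant: on a row
-- shorter than len(A) the Python A raises IndexError, and on a wider row both
-- returned values are arbitrary (no determinant exists there), so the corner is excluded.
def Pre_det_bareiss (A : List (List Int)) : Prop :=
  ∀ row ∈ A, row.length = A.length
instance (A : List (List Int)) : Decidable (Pre_det_bareiss A) := by
  unfold Pre_det_bareiss; infer_instance

def pvWitness_det_bareiss : List (List Int) := [[0, 2, 1], [3, 4, 0], [1, 0, 5]]

def Spec_det_bareiss (A : List (List Int)) (out : Int) : Prop := out = det_bareiss_alt A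
instance (A : List (List Int)) (out : Int) : Decidable (Spec_det_bareiss A out) := by
  unfold Spec_det_bareiss; infer_instance

-- ===== CLAIM (what is proved, stated in full; the proofs are below) =====
def Claim_equal_det_bareiss : Prop :=
  ∀ (A : List (List Int)), Dom_det_bareiss A → Pre_det_bareiss A →
    Spec_det_bareiss A (det_bareiss A)

-- ===== LEMMAS AND PROOFS =====

theorem pyRange_cast (a b : Nat) :
    PySem.List.pyRange (a : Int) (b : Int) 1 =
      (List.range' a (b - a)).map (fun (x : Nat) => (x : Int)) := by
  rw [PySem.List.pyRange_one, List.range'_eq_map_range]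
  have h : ((b : Int) - (a : Int)).toNat = b - a := by omega
  rw [h]
  apply List.ext_getElem
  · simp
  · intro i h1 h2
    simp
def gM (M : List (List Int)) (i j : Nat) : Int := (M.getD i []).getD j 0
def Sq (n : Nat) (M : List (List Int)) : Prop := M.length = n ∧ ∀ r ∈ M, r.length = n
def blockOf (M : List (List Int)) (k : Nat) : List (List Int) := (M.drop k).map (fun r => r.drop k)
theorem Sq.rowLen {n : Nat} {M : List (List Int)} (h : Sq n M) {i : Nat} (hi : i < n) :
    (M.getD i []).length = n := by
  have hl : i < M.length := by rw [h.1]; omega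
  rw [List.getD_eq_getElem _ _ hl]
  exact h.2 _ (List.getElem_mem hl)
theorem gM_blockOf {n : Nat} {M : List (List Int)} (h : Sq n M) {k i j : Nat}
    (hi : k + i < n) (hj : k + j < n) :
    gM (blockOf M k) i j = gM M (k + i) (k + j) := by
  have hl : i < (blockOf M k).length := by simp [blockOf, h.1]; omega
  have hl2 : k + i < M.length := by rw [h.1]; omega
  unfold gM
  rw [List.getD_eq_getElem _ _ hl, List.getD_eq_getElem _ _ hl2]
  simp only [blockOf, List.getElem_map, List.getElem_drop]
  have hrl : M[k+i].length = n := h.2 _ (List.getElem_mem hl2)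
  have hj1 : j < (M[k+i].drop k).length := by simp [hrl]; omega
  have hj2 : k + j < M[k+i].length := by omega
  rw [List.getD_eq_getElem _ _ hj1, List.getD_eq_getElem _ _ hj2]
  simp
theorem pvGetM_natCast (M : List (List Int)) (i j : Nat) :
    pvGetM M (i : Int) (j : Int) = gM M i j := by simp [pvGetM, gM]
theorem pvSetM_natCast (M : List (List Int)) (i j : Nat) (v : Int) :
    pvSetM M (i : Int) (j : Int) v = M.set i ((M.getD i []).set j v) := by
  simp [pvSetM]
def pvF (M : List (List Int)) (k i j : Nat) : Int :=
  PySem.Int.floordiv (gM M i j * gM M k k - gM M i k * gM M k j)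
    (if 0 < k then gM M (k - 1) (k - 1) else 1)
-- getD-of-set helpers
theorem getD_set_row {M : List (List Int)} {r : List Int} {i i' : Nat} (hi : i < M.length) :
    (M.set i r).getD i' [] = if i' = i then r else M.getD i' [] := by
  rcases eq_or_ne i' i with rfl | hne
  · simp [List.getD_eq_getElem?_getD, List.getElem?_set_self hi]
  · simp [List.getD_eq_getElem?_getD, List.getElem?_set_ne (Ne.symm hne), hne]
theorem getD_set_elem {r : List Int} {j j' : Nat} {v : Int} (hj : j < r.length) :
    (r.set j v).getD j' 0 = if j' = j then v else r.getD j' 0 := by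
  rcases eq_or_ne j' j with rfl | hne
  · simp [List.getD_eq_getElem?_getD, List.getElem?_set_self hj]
  · simp [List.getD_eq_getElem?_getD, List.getElem?_set_ne (Ne.symm hne), hne]
theorem Sq_set {n : Nat} {M : List (List Int)} (h : Sq n M) {i : Nat} {r : List Int}
    (hr : r.length = n) : Sq n (M.set i r) := by
  refine ⟨by simp [h.1], fun s hs => ?_⟩
  rcases List.mem_or_eq_of_mem_set hs with hs' | rfl
  · exact h.2 _ hs'
  · exact hr
theorem mapIdx_id_of_ge {r : List Int} {j0 : Nat} (f : Nat → Int) (h : r.length ≤ j0) :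
    (r.mapIdx (fun j v => if j0 ≤ j then f j else v)) = r := by
  apply List.ext_getElem
  · simp
  · intro j h1 h2
    rw [List.getElem_mapIdx]
    have : ¬ j0 ≤ j := by omega
    simp [this]
theorem set_self_getD {M : List (List Int)} {i : Nat} (h : i < M.length) :
    M.set i (M.getD i []) = M := by
  rw [List.getD_eq_getElem _ _ h]
  exact List.set_getElem_self h
theorem jloop (n k i : Nat) (M : List (List Int)) (_hSq : Sq n M)
    (hki : k < i) (hin : i < n) :
    ∀ (m j0 : Nat) (C : List (List Int)), j0 + m = n → k < j0 → Sq n C →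
    (∀ j', gM C k j' = gM M k j') →
    (∀ i', gM C i' k = gM M i' k) →
    (0 < k → gM C (k - 1) (k - 1) = gM M (k - 1) (k - 1)) →
    (∀ j', j0 ≤ j' → gM C i j' = gM M i j') →
    (List.range' j0 m).foldl (fun C (j : Nat) =>
        pvSetM C (i : Int) (j : Int)
          (PySem.Int.floordiv
            (pvGetM C (i : Int) (j : Int) * pvGetM C (k : Int) (k : Int) -
              pvGetM C (i : Int) (k : Int) * pvGetM C (k : Int) (j : Int))
            (if (k : Int) > 0 then pvGetM C ((k : Int) - 1) ((k : Int) - 1) else 1))) C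
      = C.set i ((C.getD i []).mapIdx (fun j v => if j0 ≤ j then pvF M k i j else v)) := by
  intro m
  induction m with
  | zero =>
    intro j0 C hj0 hkj0 hSqC hrowk hcolk hden hrowi
    have hrl : (C.getD i []).length = n := hSqC.rowLen hin
    have h1 : (C.getD i []).length ≤ j0 := by omega
    rw [List.range'_zero, List.foldl_nil, mapIdx_id_of_ge _ h1,
      set_self_getD (by rw [hSqC.1]; omega)]
  | succ m ih =>
    intro j0 C hj0 hkj0 hSqC hrowk hcolk hden hrowi
    have hj0n : j0 < n := by omega
    have hrl : (C.getD i []).length = n := hSqC.rowLen hin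
    have hCl : C.length = n := hSqC.1
    -- the value written at (i, j0) is pvF M k i j0
    have hval : (PySem.Int.floordiv
        (pvGetM C (i : Int) (j0 : Int) * pvGetM C (k : Int) (k : Int) -
          pvGetM C (i : Int) (k : Int) * pvGetM C (k : Int) (j0 : Int))
        (if (k : Int) > 0 then pvGetM C ((k : Int) - 1) ((k : Int) - 1) else 1))
        = pvF M k i j0 := by
      rw [pvGetM_natCast, pvGetM_natCast, pvGetM_natCast, pvGetM_natCast,
        hrowi j0 le_rfl, hrowk, hcolk, hrowk]
      unfold pvF
      rcases Nat.eq_zero_or_pos k with rfl | hk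
      · norm_num
      · have hgt : ((k : Nat) : Int) > 0 := by exact_mod_cast hk
        have hc : ((k : Nat) : Int) - 1 = ((k - 1 : Nat) : Int) := by omega
        rw [if_pos hgt, if_pos hk, hc, pvGetM_natCast, hden hk]
    rw [List.range'_succ, List.foldl_cons, hval, pvSetM_natCast]
    set row := C.getD i [] with hrow
    set C1 := C.set i (row.set j0 (pvF M k i j0)) with hC1
    have hrow1 : C1.getD i [] = row.set j0 (pvF M k i j0) := by
      rw [hC1, getD_set_row (by omega)]; simp
    have hSqC1 : Sq n C1 := Sq_set hSqC (by simp [hrl])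
    have hju : j0 < row.length := by omega
    have hgC1 : ∀ i' j', gM C1 i' j' =
        if i' = i then (if j' = j0 then pvF M k i j0 else gM C i j') else gM C i' j' := by
      intro i' j'
      unfold gM
      rw [hC1, getD_set_row (by omega)]
      by_cases hne : i' = i
      · subst hne
        rw [if_pos rfl, if_pos rfl, getD_set_elem hju]
      · rw [if_neg hne, if_neg hne]
    rw [ih (j0 + 1) C1 (by omega) (by omega) hSqC1
      (fun j' => by
        rw [hgC1, if_neg (Nat.ne_of_lt hki)]; exact hrowk j')
      (fun i' => by
        rw [hgC1]
        by_cases hne : i' = i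
        · rw [if_pos hne, if_neg (show ¬ (k = j0) by omega), ← hne]
          exact hcolk i'
        · rw [if_neg hne]; exact hcolk i')
      (fun hk => by
        rw [hgC1, if_neg (show ¬ (k - 1 = i) by omega)]; exact hden hk)
      (fun j' hj' => by
        rw [hgC1]
        by_cases hne : j' = j0
        · exact absurd hne (by omega)
        · by_cases hii : (i : Nat) = i
          · rw [if_pos rfl, if_neg hne]; exact hrowi j' (by omega)
          · exact absurd rfl hii)]
    rw [hrow1, hC1, List.set_set]
    congr 1
    apply List.ext_getElem
    · simp
    · intro j h1 h2
      rw [List.getElem_mapIdx, List.getElem_mapIdx]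
      by_cases e2 : j0 ≤ j
      · by_cases e1 : j0 + 1 ≤ j
        · simp [e1, e2]
        · have hjj : j = j0 := by omega
          subst hjj
          rw [if_neg e1, if_pos e2, List.getElem_set_self (by simpa using h1)]
      · have e1 : ¬ (j0 + 1 ≤ j) := by omega
        rw [if_neg e1, if_neg e2, List.getElem_set_ne (by omega)]
theorem mapIdxRows_id_of_ge {C : List (List Int)} {i0 : Nat}
    (g : Nat → List Int → List Int) (h : C.length ≤ i0) :
    (C.mapIdx (fun i' row => if i0 ≤ i' then g i' row else row)) = C := by
  apply List.ext_getElem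
  · simp
  · intro i h1 h2
    rw [List.getElem_mapIdx]
    have : ¬ i0 ≤ i := by omega
    simp [this]
theorem iloop (n k : Nat) (M : List (List Int)) (hSq : Sq n M) (hk : k < n) :
    ∀ (m i0 : Nat) (C : List (List Int)), i0 + m = n → k < i0 → Sq n C →
    (∀ j', gM C k j' = gM M k j') →
    (∀ i', gM C i' k = gM M i' k) →
    (0 < k → gM C (k - 1) (k - 1) = gM M (k - 1) (k - 1)) →
    (∀ i' j', i0 ≤ i' → gM C i' j' = gM M i' j') →
    (List.range' i0 m).foldl (fun C (i : Nat) =>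
        (List.range' (k + 1) (n - (k + 1))).foldl (fun C (j : Nat) =>
          pvSetM C (i : Int) (j : Int)
            (PySem.Int.floordiv
              (pvGetM C (i : Int) (j : Int) * pvGetM C (k : Int) (k : Int) -
                pvGetM C (i : Int) (k : Int) * pvGetM C (k : Int) (j : Int))
              (if (k : Int) > 0 then pvGetM C ((k : Int) - 1) ((k : Int) - 1) else 1))) C) C
      = C.mapIdx (fun i' row =>
          if i0 ≤ i' then row.mapIdx (fun j v => if k + 1 ≤ j then pvF M k i' j else v)
          else row) := by
  intro m
  induction m with
  | zero =>
    intro i0 C hi0 hki0 hSqC hrowk hcolk hden hrows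
    rw [List.range'_zero, List.foldl_nil,
      mapIdxRows_id_of_ge _ (by rw [hSqC.1]; omega)]
  | succ m ih =>
    intro i0 C hi0 hki0 hSqC hrowk hcolk hden hrows
    have hi0n : i0 < n := by omega
    have hrl : (C.getD i0 []).length = n := hSqC.rowLen hi0n
    rw [List.range'_succ, List.foldl_cons]
    rw [jloop n k i0 M hSq hki0 hi0n (n - (k + 1)) (k + 1) C (by omega) (by omega)
      hSqC hrowk hcolk hden (fun j' _ => hrows i0 j' le_rfl)]
    set g : Nat → Int → Int := fun j v => if k + 1 ≤ j then pvF M k i0 j else v with hg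
    set C1 := C.set i0 ((C.getD i0 []).mapIdx g) with hC1
    have hrow1 : C1.getD i0 [] = (C.getD i0 []).mapIdx g := by
      rw [hC1, getD_set_row (by rw [hSqC.1]; omega)]; simp
    have hSqC1 : Sq n C1 := Sq_set hSqC (by rw [List.length_mapIdx]; exact hrl)
    have hgC1 : ∀ i' j', gM C1 i' j' =
        if i' = i0 then (if k + 1 ≤ j' ∧ j' < n then pvF M k i0 j' else gM C i0 j')
        else gM C i' j' := by
      intro i' j'
      unfold gM
      rw [hC1, getD_set_row (by rw [hSqC.1]; omega)]
      by_cases hne : i' = i0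
      · subst hne
        rw [if_pos rfl, if_pos rfl]
        by_cases hjn : j' < n
        · have hj1 : j' < (C.getD i' []).length := by omega
          rw [List.getD_eq_getElem _ _ (by rw [List.length_mapIdx]; exact hj1),
            List.getD_eq_getElem _ _ hj1, List.getElem_mapIdx]
          by_cases hkj : k + 1 ≤ j'
          · rw [if_pos ⟨hkj, hjn⟩, hg]; simp [hkj]
          · rw [if_neg (by tauto), hg]; simp [hkj]
        · have e1 : ¬ (k + 1 ≤ j' ∧ j' < n) := by tauto
          rw [if_neg e1, List.getD_eq_default _ _ (by rw [List.length_mapIdx]; omega),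
            List.getD_eq_default _ _ (by omega)]
      · rw [if_neg hne, if_neg hne]
    rw [ih (i0 + 1) C1 (by omega) (by omega) hSqC1
      (fun j' => by
        rw [hgC1, if_neg (Nat.ne_of_lt hki0)]; exact hrowk j')
      (fun i' => by
        rw [hgC1]
        by_cases hne : i' = i0
        · rw [if_pos hne, if_neg (by omega), ← hne]
          exact hcolk i'
        · rw [if_neg hne]; exact hcolk i')
      (fun hk' => by
        rw [hgC1, if_neg (show ¬ (k - 1 = i0) by omega)]; exact hden hk')
      (fun i' j' hi' => by
        rw [hgC1, if_neg (by omega)]; exact hrows i' j' (by omega))]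
    simp only [hC1]
    apply List.ext_getElem
    · simp
    · intro i' h1 h2
      rw [List.getElem_mapIdx, List.getElem_mapIdx,
        List.getElem_set (by simp at h1 ⊢; omega)]
      by_cases e2 : i0 ≤ i'
      · by_cases e1 : i0 + 1 ≤ i'
        · rw [if_pos e1, if_pos e2, if_neg (show ¬ (i0 = i') by omega)]
        · have hii : i0 = i' := by omega
          rw [if_neg e1, if_pos e2, if_pos hii]
          subst hii
          rw [List.getD_eq_getElem C [] (by rw [hSqC.1]; omega), hg]
      · rw [if_neg (show ¬ (i0 + 1 ≤ i') by omega), if_neg e2,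
          if_neg (show ¬ (i0 = i') by omega)]
def swapN (M : List (List Int)) (k i : Nat) : List (List Int) :=
  (M.set k (M.getD i [])).set i (M.getD k [])
def pivotFix (n k : Nat) (M : List (List Int)) : Option (List (List Int)) :=
  if gM M k k = 0 then
    match (List.range' (k + 1) (n - (k + 1))).find? (fun i => gM M i k != 0) with
    | some i => some (swapN M k i)
    | none => none
  else some M
def updB (M : List (List Int)) (k : Nat) : List (List Int) :=
  M.mapIdx (fun i row =>
    if k + 1 ≤ i then
      row.mapIdx (fun j v => if k + 1 ≤ j then pvF M k i j else v)
    else row)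
-- first-match search is insensitive to pointwise-equal predicates (no named Mathlib lemma found)
theorem find?_congr_mem {α : Type} {l : List α} {p q : α → Bool}
    (h : ∀ x ∈ l, p x = q x) : l.find? p = l.find? q := by
  induction l with
  | nil => rfl
  | cons x xs ih =>
    rw [List.find?_cons, List.find?_cons, h x List.mem_cons_self]
    cases q x
    · exact ih (fun y hy => h y (List.mem_cons_of_mem _ hy))
    · rfl
theorem Sq_swapN {n : Nat} {M : List (List Int)} (h : Sq n M) {k i : Nat}
    (hk : k < n) (hi : i < n) : Sq n (swapN M k i) := by
  have h1 : (M.getD i []).length = n := h.rowLen hi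
  have h2 : (M.getD k []).length = n := h.rowLen hk
  refine ⟨by simp [swapN, h.1], fun r hr => ?_⟩
  rcases List.mem_or_eq_of_mem_set hr with hr' | rfl
  · rcases List.mem_or_eq_of_mem_set hr' with hr'' | rfl
    · exact h.2 _ hr''
    · exact h1
  · exact h2
theorem Sq_updB {n : Nat} {M : List (List Int)} (h : Sq n M) (k : Nat) :
    Sq n (updB M k) := by
  refine ⟨by simp [updB, h.1], fun r hr => ?_⟩
  rw [updB, List.mem_iff_getElem] at hr
  obtain ⟨i, hil, hr⟩ := hr
  rw [List.getElem_mapIdx] at hr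
  rw [List.length_mapIdx] at hil
  have hrow : M[i].length = n := h.2 _ (List.getElem_mem hil)
  subst hr
  split
  · simp [hrow]
  · exact hrow
theorem gM_swapN_lt {M : List (List Int)} {k i i' : Nat} (hik : i' < k) (hki : k < i)
    (hkl : k < M.length) (hil : i < M.length) (j' : Nat) :
    gM (swapN M k i) i' j' = gM M i' j' := by
  unfold gM swapN
  rw [getD_set_row (by simpa using hil), if_neg (by omega),
    getD_set_row hkl, if_neg (by omega)]
theorem updB_row_le {M : List (List Int)} {k i : Nat} (h : i ≤ k) :
    (updB M k).getD i [] = M.getD i [] := by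
  unfold updB
  rcases Nat.lt_or_ge i M.length with hl | hl
  · rw [List.getD_eq_getElem _ _ (by rw [List.length_mapIdx]; omega),
      List.getD_eq_getElem _ _ hl, List.getElem_mapIdx, if_neg (by omega)]
  · rw [List.getD_eq_default _ _ (by rw [List.length_mapIdx]; omega),
      List.getD_eq_default _ _ (by omega)]
theorem blockOf_set {M : List (List Int)} {r : List Int} {k i : Nat} (h : k ≤ i) :
    blockOf (M.set i r) k = (blockOf M k).set (i - k) (r.drop k) := by
  unfold blockOf
  rw [List.drop_set, if_neg (by omega), List.map_set]
theorem blockOf_getD {n : Nat} {M : List (List Int)} (h : Sq n M) {k i : Nat}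
    (hi : k + i < n) : (blockOf M k).getD i [] = (M.getD (k + i) []).drop k := by
  have h1 : i < (blockOf M k).length := by simp [blockOf, h.1]; omega
  have h2 : k + i < M.length := by rw [h.1]; omega
  rw [List.getD_eq_getElem _ _ h1, List.getD_eq_getElem _ _ h2]
  simp [blockOf]
theorem blockOf_len {n : Nat} {M : List (List Int)} (h : Sq n M) (k : Nat) :
    (blockOf M k).length = n - k := by
  simp [blockOf, h.1]
theorem pvGetM_zero (M : List (List Int)) : pvGetM M 0 0 = gM M 0 0 := by
  simpa using pvGetM_natCast M 0 0
theorem blockOf_swapN {n : Nat} {M : List (List Int)} (h : Sq n M) {k i : Nat}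
    (hki : k < i) (hin : i < n) :
    blockOf (swapN M k i) k = pvSwap0 (blockOf M k) ((i - k : Nat) : Int) := by
  have hkn : k < n := by omega
  have g1 : PySem.List.pyGetD (blockOf M k) ((i - k : Nat) : Int) [] =
      (M.getD i []).drop k := by
    rw [PySem.List.pyGetD_natCast]
    have e : k + (i - k) = i := by omega
    have hb := blockOf_getD h (show k + (i - k) < n by omega)
    rw [e] at hb
    exact hb
  have g2 : PySem.List.pyGetD (blockOf M k) (0 : Int) [] = (M.getD k []).drop k := by
    rw [PySem.List.pyGetD_zero]
    have hb := blockOf_getD h (show k + 0 < n by omega)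
    simpa using hb
  unfold swapN pvSwap0
  rw [blockOf_set (by omega), blockOf_set (by omega), Nat.sub_self,
    g1, g2, PySem.List.pySetD_natCast]
  simp [PySem.List.pySetD_of_nonneg]
theorem pyRange_one_cast' (b : Nat) :
    PySem.List.pyRange 1 (b : Int) 1 =
      (List.range' 1 (b - 1)).map (fun (x : Nat) => (x : Int)) := by
  have h := pyRange_cast 1 b
  simpa using h
theorem blockOf_updB {n : Nat} {M : List (List Int)} (h : Sq n M) {k : Nat}
    (hk : k + 1 < n) :
    blockOf (updB M k) (k + 1) =
      pvCondense (blockOf M k) (if 0 < k then gM M (k - 1) (k - 1) else 1) := by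
  have hSqU : Sq n (updB M k) := Sq_updB h k
  have hBlen : (blockOf M k).length = n - k := blockOf_len h k
  apply List.ext_getElem
  · rw [blockOf_len hSqU]
    unfold pvCondense
    rw [PySem.List.slice_from_one]
    simp [hBlen]
    omega
  · intro i'' h1 h2
    have hil : k + 1 + i'' < n := by rw [blockOf_len hSqU] at h1; omega
    have hiM : k + 1 + i'' < M.length := by rw [h.1]; omega
    have hrl : M[k + 1 + i''].length = n := h.2 _ (List.getElem_mem hiM)
    have hrowU : (updB M k)[k + 1 + i'']'(by rw [hSqU.1]; omega) =
        M[k + 1 + i''].mapIdx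
          (fun j v => if k + 1 ≤ j then pvF M k (k + 1 + i'') j else v) := by
      simp only [updB]
      rw [List.getElem_mapIdx, if_pos (by omega)]
    have htail : (blockOf M k).tail[i'']'(by simp [hBlen] at h1 ⊢; omega) =
        M[k + 1 + i''].drop k := by
      rw [List.getElem_tail]
      simp only [blockOf]
      rw [List.getElem_map, List.getElem_drop]
      congr 2
      omega
    have hL : (blockOf (updB M k) (k + 1))[i'']'h1 =
        (M[k + 1 + i''].mapIdx
          (fun j v => if k + 1 ≤ j then pvF M k (k + 1 + i'') j else v)).drop (k + 1) := by
      simp only [blockOf]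
      rw [List.getElem_map, List.getElem_drop, hrowU]
    have hR : (pvCondense (blockOf M k) (if 0 < k then gM M (k - 1) (k - 1) else 1))[i'']'h2 =
        List.map ((fun j =>
          PySem.Int.floordiv
            (PySem.List.pyGetD (M[k + 1 + i''].drop k) j 0 * pvGetM (blockOf M k) 0 0 -
              PySem.List.pyGetD (M[k + 1 + i''].drop k) 0 0 *
                PySem.List.pyGetD (PySem.List.pyGetD (blockOf M k) 0 []) j 0)
            (if 0 < k then gM M (k - 1) (k - 1) else 1)) ∘ (fun (x : Nat) => (x : Int)))
          (List.range' 1 (n - k - 1)) := by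
    -- unfold the comprehension cell by cell
      simp only [pvCondense]
      rw [List.getElem_map]
      have hsl : (PySem.List.slice (blockOf M k) (some 1) none) = (blockOf M k).tail :=
        PySem.List.slice_from_one _
      have e1 : ((blockOf M k).length : Int) = (((n - k : Nat)) : Int) := by rw [hBlen]
      rw [List.getElem_of_eq hsl, htail, e1, pyRange_one_cast', List.map_map]
    rw [hL, hR]
    apply List.ext_getElem
    · simp [hrl]
      omega
    · intro j'' g1 g2
      have hjn : k + 1 + j'' < n := by
        simp [hrl] at g1
        omega
      rw [List.getElem_drop, List.getElem_mapIdx, if_pos (by omega), List.getElem_map,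
        List.getElem_range']
      rw [(by omega : (1 : Nat) + 1 * j'' = 1 + j'')]
      simp only [Function.comp]
      have rA : PySem.List.pyGetD (M[k + 1 + i''].drop k) (((1 + j'' : Nat)) : Int) 0 =
          gM M (k + 1 + i'') (k + 1 + j'') := by
        unfold gM
        rw [PySem.List.pyGetD_natCast, List.getD_eq_getElem M [] hiM,
          List.getD_eq_getElem _ _ (by simp [hrl]; omega),
          List.getElem_drop, List.getD_eq_getElem _ _ (by omega)]
        congr 1
        omega
      have rB : pvGetM (blockOf M k) 0 0 = gM M k k := by
        rw [pvGetM_zero]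
        have hb := gM_blockOf h (show k + 0 < n by omega) (show k + 0 < n by omega)
        simpa using hb
      have rC : PySem.List.pyGetD (M[k + 1 + i''].drop k) 0 0 =
          gM M (k + 1 + i'') k := by
        unfold gM
        rw [PySem.List.pyGetD_zero, List.getD_eq_getElem M [] hiM,
          List.getD_eq_getElem _ _ (by simp [hrl]; omega),
          List.getElem_drop, List.getD_eq_getElem _ _ (by omega)]
        simp
      have rD : PySem.List.pyGetD (PySem.List.pyGetD (blockOf M k) 0 [])
            (((1 + j'' : Nat)) : Int) 0 = gM M k (k + 1 + j'') := by
        unfold gM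
        rw [PySem.List.pyGetD_zero]
        have hb := blockOf_getD h (show k + 0 < n by omega)
        simp only [Nat.add_zero] at hb
        rw [hb, PySem.List.pyGetD_natCast,
          List.getD_eq_getElem _ _ (by rw [List.length_drop, h.rowLen (by omega : k < n)]; omega),
          List.getElem_drop,
          List.getD_eq_getElem _ _
            (show k + 1 + j'' < (M.getD k []).length by
              rw [h.rowLen (by omega : k < n)]; omega)]
        congr 1
        omega
      rw [rA, rB, rC, rD]
      rfl
theorem pvGetM_cast0 (M : List (List Int)) (i : Nat) :
    pvGetM M (i : Int) 0 = gM M i 0 := by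
  simpa using pvGetM_natCast M i 0
theorem updLoop_eq (n k : Nat) (Ms : List (List Int)) (hSq : Sq n Ms) (hk : k + 1 ≤ n) :
    (PySem.List.pyRange ((k : Int) + 1) (n : Int) 1).foldl (fun M i =>
      (PySem.List.pyRange ((k : Int) + 1) (n : Int) 1).foldl (fun M j =>
        pvSetM M i j (PySem.Int.floordiv
          (pvGetM M i j * pvGetM M (k : Int) (k : Int) -
            pvGetM M i (k : Int) * pvGetM M (k : Int) j)
          (if (k : Int) > 0 then pvGetM M ((k : Int) - 1) ((k : Int) - 1) else 1))) M) Ms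
    = updB Ms k := by
  have hc : ((k : Int) + 1) = (((k + 1 : Nat)) : Int) := by push_cast; ring
  rw [hc, pyRange_cast, List.foldl_map]
  simp only [List.foldl_map]
  exact iloop n k Ms hSq (by omega) (n - (k + 1)) (k + 1) Ms (by omega) (by omega) hSq
    (fun _ => rfl) (fun _ => rfl) (fun _ => rfl) (fun _ _ _ => rfl)
def bodyA (n : Int) : Option (List (List Int)) → Int → Option (List (List Int)) :=
  fun st k =>
    match st with
    | none => none
    | some M =>
      let fixed : Option (List (List Int)) :=
        if pvGetM M k k = 0 then
          match (PySem.List.pyRange (k + 1) n 1).find?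
                  (fun i => pvGetM M i k != 0) with
          | some i =>
              some (PySem.List.pySetD
                      (PySem.List.pySetD M k (PySem.List.pyGetD M i []))
                      i (PySem.List.pyGetD M k []))
          | none => none
        else some M
      match fixed with
      | none => none
      | some M =>
        some ((PySem.List.pyRange (k + 1) n 1).foldl (fun M i =>
          (PySem.List.pyRange (k + 1) n 1).foldl (fun M j =>
            let num := pvGetM M i j * pvGetM M k k - pvGetM M i k * pvGetM M k j
            let den := if k > 0 then pvGetM M (k - 1) (k - 1) else 1
            pvSetM M i j (PySem.Int.floordiv num den)) M) M)
theorem bodyA_step (n k : Nat) (M : List (List Int)) (hSq : Sq n M) (hk : k + 1 < n) :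
    bodyA (n : Int) (some M) (k : Int) =
      (match pivotFix n k M with
       | none => none
       | some Ms => some (updB Ms k)) := by
  have hfind : (PySem.List.pyRange ((k : Int) + 1) (n : Int) 1).find?
        (fun i => pvGetM M i (k : Int) != 0)
      = ((List.range' (k + 1) (n - (k + 1))).find? (fun i => gM M i k != 0)).map
          (fun (x : Nat) => (x : Int)) := by
    rw [(by push_cast; ring : ((k : Int) + 1) = (((k + 1 : Nat)) : Int)),
      pyRange_cast, List.find?_map]
    exact congrArg _ (find?_congr_mem (fun x hx => by
      simp only [Function.comp]
      rw [pvGetM_natCast]))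
  simp only [bodyA]
  rw [pvGetM_natCast, hfind]
  unfold pivotFix
  by_cases hz : gM M k k = 0
  · rw [if_pos hz, if_pos hz]
    cases hf : (List.range' (k + 1) (n - (k + 1))).find? (fun i => gM M i k != 0) with
    | none => simp
    | some i =>
      simp only [Option.map_some]
      have hmem := List.mem_range'_1.mp (List.mem_of_find?_eq_some hf)
      have hswap : PySem.List.pySetD
            (PySem.List.pySetD M (k : Int) (PySem.List.pyGetD M ((i : Nat) : Int) []))
            ((i : Nat) : Int) (PySem.List.pyGetD M (k : Int) []) = swapN M k i := by
        rw [PySem.List.pyGetD_natCast, PySem.List.pyGetD_natCast,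
          PySem.List.pySetD_natCast, PySem.List.pySetD_natCast]
        rfl
      rw [hswap]
      exact congrArg some (updLoop_eq n k _ (Sq_swapN hSq (by omega) (by omega)) (by omega))
  · rw [if_neg hz, if_neg hz]
    exact congrArg some (updLoop_eq n k M hSq (by omega))
def pvFinal (n : Nat) : Option (List (List Int)) → Int
  | none => 0
  | some M => gM M (n - 1) (n - 1)
theorem loopA_none' (n : Int) (l : List Nat) :
    l.foldl (fun st (kk : Nat) => bodyA n st (kk : Int)) none = none := by
  induction l with
  | nil => rfl
  | cons x xs ih => simpa [bodyA] using ih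
theorem mainSim : ∀ (m : Nat), 1 ≤ m → ∀ (n k : Nat) (M : List (List Int)) (p : Int),
    Sq n M → k + m = n → p = (if k = 0 then 1 else gM M (k - 1) (k - 1)) →
    (∀ M', (List.range' k (n - 1 - k)).foldl
        (fun st (kk : Nat) => bodyA (n : Int) st (kk : Int)) (some M) = some M' → Sq n M') ∧
    pvFinal n ((List.range' k (n - 1 - k)).foldl
        (fun st (kk : Nat) => bodyA (n : Int) st (kk : Int)) (some M)) = pvGoB (blockOf M k) p := by
  intro m
  induction m with
  | zero => intro h; omega
  | succ m' ih =>
    intro _ n k M p hSq hkm hp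
    by_cases hm : m' = 0
    · -- final step: k = n - 1, the loop is over and the block is the single last entry
      subst hm
      have hkn : k = n - 1 := by omega
      have hrange : n - 1 - k = 0 := by omega
      rw [hrange, List.range'_zero, List.foldl_nil]
      have hrowk : (M.getD k []).length = n := hSq.rowLen (by omega)
      have hblock : blockOf M k = [[gM M k k]] := by
        have h1 : M.drop k = [M.getD k []] := by
          apply List.ext_getElem
          · simp [hSq.1]; omega
          · intro i h1 h2
            simp at h2
            subst h2
            rw [List.getElem_drop, List.getElem_cons_zero,
              List.getD_eq_getElem _ _ (by rw [hSq.1]; omega)]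
            simp
        have h2 : (M.getD k []).drop k = [gM M k k] := by
          have hlen : ((M.getD k []).drop k).length = 1 := by
            rw [List.length_drop, hrowk]; omega
          obtain ⟨x, hx⟩ := List.length_eq_one_iff.mp hlen
          rw [hx]
          congr 1
          have h0 : ((M.getD k []).drop k)[0]'(by rw [hx]; simp) = x := by
            rw [List.getElem_of_eq hx]
            simp
          rw [← h0, List.getElem_drop]
          unfold gM
          rw [List.getD_eq_getElem _ _
            (show k < (M.getD k []).length by rw [hrowk]; omega)]
          simp
        rw [blockOf, h1, List.map_cons, List.map_nil, h2]
      constructor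
      · intro M' hM'
        cases hM'
        exact hSq
      · rw [hblock, pvGoB]
        show gM M (n - 1) (n - 1) = PySem.List.pyGetD [gM M k k] 0 0
        rw [PySem.List.pyGetD_zero_cons, hkn]
    · -- one elimination step followed by the rest of the loop
      have hkn : k + 1 < n := by omega
      have hr : n - 1 - k = m' := by omega
      have hm1 : m' = (m' - 1) + 1 := by omega
      rw [hr, hm1, List.range'_succ, List.foldl_cons, bodyA_step n k M hSq hkn]
      have hblen : (blockOf M k).length = m' + 1 := by rw [blockOf_len hSq]; omega
      obtain ⟨a, b, rest, hb⟩ : ∃ a b rest, blockOf M k = a :: b :: rest := by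
        rcases hbb : blockOf M k with _ | ⟨a, _ | ⟨b, rest⟩⟩
        · rw [hbb] at hblen; simp at hblen
        · rw [hbb] at hblen; simp at hblen; omega
        · exact ⟨a, b, rest, rfl⟩
      have hg00 : pvGetM (a :: b :: rest) 0 0 = gM M k k := by
        rw [← hb, pvGetM_zero]
        have hbv := gM_blockOf (M := M) (k := k) (i := 0) (j := 0) hSq
          (by omega) (by omega)
        simpa using hbv
      have hfB : (PySem.List.pyRange 1 (((a :: b :: rest).length : Nat) : Int) 1).find?
            (fun i => pvGetM (a :: b :: rest) i 0 != 0)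
          = ((List.range' 1 m').find? (fun x => gM (blockOf M k) x 0 != 0)).map
              (fun (x : Nat) => (x : Int)) := by
        rw [← hb, show (((blockOf M k).length : Nat) : Int) = (((m' + 1 : Nat)) : Int) by
            rw [hblen], pyRange_one_cast']
        rw [List.find?_map]
        exact congrArg _ (find?_congr_mem (fun x hx => by
          simp only [Function.comp]
          rw [pvGetM_cast0]))
      have hfA : (List.range' (k + 1) (n - (k + 1))).find? (fun i => gM M i k != 0)
          = ((List.range' 1 m').find? (fun x => gM (blockOf M k) x 0 != 0)).map
              (fun x => k + x) := by
        have hlen : n - (k + 1) = m' := by omega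
        rw [hlen,
          show List.range' (k + 1) m' = (List.range' 1 m').map (fun x => k + x) from
            (List.map_add_range' 1 m' 1).symm,
          List.find?_map]
        exact congrArg _ (find?_congr_mem (fun x hx => by
          have hx' := List.mem_range'_1.mp hx
          simp only [Function.comp]
          have hbv := gM_blockOf (M := M) (k := k) (i := x) (j := 0) hSq
            (by omega) (by omega)
          simp only [Nat.add_zero] at hbv
          rw [← hbv]))
      -- the common continuation once the pivot row Ms is fixed
      have hcont : ∀ (Ms : List (List Int)), Sq n Ms →
          gM Ms k k = pvGetM (blockOf Ms k) 0 0 →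
          (0 < k → gM Ms (k - 1) (k - 1) = gM M (k - 1) (k - 1)) →
          (∀ M', (List.range' (k + 1) (m' - 1)).foldl
              (fun st (kk : Nat) => bodyA (n : Int) st (kk : Int))
              (some (updB Ms k)) = some M' → Sq n M') ∧
          pvFinal n ((List.range' (k + 1) (m' - 1)).foldl
              (fun st (kk : Nat) => bodyA (n : Int) st (kk : Int)) (some (updB Ms k)))
            = pvGoB (pvCondense (blockOf Ms k) p) (pvGetM (blockOf Ms k) 0 0) := by
        intro Ms hSqMs hpiv hden
        have hSqU : Sq n (updB Ms k) := Sq_updB hSqMs k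
        have hnext := ih (by omega) n (k + 1) (updB Ms k)
          (pvGetM (blockOf Ms k) 0 0) hSqU (by omega)
          (by
            rw [if_neg (by omega)]
            have hrow : (updB Ms k).getD (k + 1 - 1) [] = Ms.getD k [] := updB_row_le (by omega)
            unfold gM
            rw [hrow, ← hpiv]
            rfl)
        have hre : n - 1 - (k + 1) = m' - 1 := by omega
        rw [hre] at hnext
        refine ⟨hnext.1, ?_⟩
        rw [hnext.2, blockOf_updB hSqMs hkn]
        congr 1
        rw [hp]
        rcases Nat.eq_zero_or_pos k with rfl | hkpos
        · norm_num
        · rw [if_pos hkpos, if_neg (by omega), hden hkpos]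
      unfold pivotFix
      by_cases hz : gM M k k = 0
      · rw [if_pos hz, hfA]
        cases hN : (List.range' 1 m').find? (fun x => gM (blockOf M k) x 0 != 0) with
        | none =>
          simp only [Option.map_none]
          constructor
          · intro M' habs
            rw [loopA_none'] at habs
            cases habs
          · rw [loopA_none']
            show (0 : Int) = pvGoB (blockOf M k) p
            rw [hb, pvGoB]
            simp only [if_pos (hg00.trans hz : pvGetM (a :: b :: rest) 0 0 = 0), hfB, hN,
              Option.map_none]
        | some r =>
          simp only [Option.map_some]
          have hr' := List.mem_range'_1.mp (List.mem_of_find?_eq_some hN)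
          have hres := hcont (swapN M k (k + r))
            (Sq_swapN hSq (by omega) (by omega))
            (by
              rw [pvGetM_zero]
              have hbv := gM_blockOf (M := swapN M k (k + r)) (k := k) (i := 0) (j := 0)
                (Sq_swapN hSq (by omega) (by omega)) (by omega) (by omega)
              simp only [Nat.add_zero] at hbv
              rw [hbv])
            (fun hkpos => gM_swapN_lt (by omega) (by omega)
              (by rw [hSq.1]; omega) (by rw [hSq.1]; omega) _)
          refine ⟨hres.1, ?_⟩
          rw [hres.2]
          -- B side takes the same swap branch
          rw [hb, pvGoB]
          simp only [if_pos (hg00.trans hz : pvGetM (a :: b :: rest) 0 0 = 0), hfB, hN,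
            Option.map_some]
          have hswb : blockOf (swapN M k (k + r)) k =
              pvSwap0 (a :: b :: rest) ((r : Nat) : Int) := by
            rw [← hb]
            have h1 := blockOf_swapN (n := n) (M := M) hSq
              (show k < k + r by omega) (show k + r < n by omega)
            rw [h1]
            have h2 : k + r - k = r := by omega
            rw [h2]
          rw [← hswb]
      · rw [if_neg hz]
        have hres := hcont M hSq
          (by
            rw [pvGetM_zero]
            have hbv := gM_blockOf (M := M) (k := k) (i := 0) (j := 0) hSq
              (by omega) (by omega)
            simp only [Nat.add_zero] at hbv
            rw [hbv])
          (fun _ => rfl)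
        refine ⟨hres.1, ?_⟩
        rw [hres.2]
        rw [hb, pvGoB]
        rw [if_neg (by rw [hg00]; exact hz), ← hb]
theorem det_bareiss_eq (A : List (List Int)) :
    det_bareiss A =
      (if (A.length : Int) = 0 then 1
       else
         match (PySem.List.pyRange 0 ((A.length : Int) - 1) 1).foldl
                 (bodyA (A.length : Int)) (some (A.map (fun row => row))) with
         | none => 0
         | some M => PySem.List.pyGetD (PySem.List.pyGetD M (-1) []) (-1) 0) := rfl
theorem pyRange_zero_cast' (b : Nat) :
    PySem.List.pyRange 0 (b : Int) 1 =
      (List.range' 0 b).map (fun (x : Nat) => (x : Int)) := by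
  have h := pyRange_cast 0 b
  simpa using h
theorem blockOf_zero (M : List (List Int)) : blockOf M 0 = M := by
  simp [blockOf]
theorem final_spec (A : List (List Int)) (hPre : ∀ row ∈ A, row.length = A.length) :
    det_bareiss A = det_bareiss_alt A := by
  rcases Nat.eq_zero_or_pos A.length with hA0 | hApos
  · have hAnil : A = [] := List.length_eq_zero_iff.mp hA0
    subst hAnil
    rfl
  · have hAne : A ≠ [] := by
      intro h; rw [h] at hApos; simp at hApos
    have hSq : Sq A.length A := ⟨rfl, hPre⟩
    rw [det_bareiss_eq, if_neg (by exact_mod_cast Nat.pos_iff_ne_zero.mp hApos)]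
    unfold det_bareiss_alt
    rw [if_neg hAne, List.map_id']
    have h1 : ((A.length : Int) - 1) = ((A.length - 1 : Nat) : Int) := by omega
    rw [h1, pyRange_zero_cast', List.foldl_map]
    have hsim := mainSim A.length (by omega) A.length 0 A 1 hSq (by omega) (by norm_num)
    rw [Nat.sub_zero] at hsim
    rw [blockOf_zero] at hsim
    cases hres : (List.range' 0 (A.length - 1)).foldl
        (fun st (kk : Nat) => bodyA (A.length : Int) st (kk : Int)) (some A) with
    | none =>
      rw [hres] at hsim
      exact hsim.2.symm ▸ rfl
    | some Mf =>
      rw [hres] at hsim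
      have hSqf : Sq A.length Mf := hsim.1 Mf rfl
      have hMfne : Mf ≠ [] := by
        intro h
        rw [h] at hSqf
        have := hSqf.1
        simp at this
        omega
      have hlast : Mf.getLast hMfne ≠ [] := by
        intro h
        have hmem := List.getLast_mem hMfne
        have := hSqf.2 _ hmem
        rw [h] at this
        simp at this
        omega
      have hMl : Mf.length = A.length := hSqf.1
      show PySem.List.pyGetD (PySem.List.pyGetD Mf (-1) []) (-1) 0 = _
      rw [PySem.List.pyGetD_neg_ofNat Mf 1 [] (by omega) (by omega)]
      simp only [hMl]
      have hrowlen : (Mf[A.length - 1]'(by omega)).length = A.length :=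
        hSqf.2 _ (List.getElem_mem _)
      rw [PySem.List.pyGetD_neg_ofNat _ 1 0 (by omega) (by rw [hrowlen]; omega)]
      simp only [hrowlen]
      rw [← hsim.2]
      show _ = gM Mf (A.length - 1) (A.length - 1)
      unfold gM
      rw [List.getD_eq_getElem _ _ (show A.length - 1 < Mf.length by omega),
        List.getD_eq_getElem _ _ (by rw [hrowlen]; omega)]

-- ===== VERDICT (by name: the statement is the Claim_ definition above) =====
theorem det_bareiss_spec : Claim_equal_det_bareiss := by
  intro A _hDom hPre
  show det_bareiss A = det_bareiss_alt A
  exact final_spec A hPre
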